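-- pv_equiv track=rewrite | github.com/yugj3323j/ATML_lab6 | lab6_encoder_decoder/utils/dataset.py | get_fallback_eng_hindi_pairs
-- ===== SOURCE A (Python) =====
-- from typing import List, Sequence, Tuple
--
-- def get_fallback_eng_hindi_pairs(n: int = 200) -> List[Tuple[str, str]]:
--     english_templates = [
--         "i am going to school",
--         "he is reading a book",
--         "she likes music",
--         "we are learning machine learning",
--         "this is a beautiful day",
--         "they are playing cricket",
--         "please open the door",
--         "the food is very tasty",
--         "where is the nearest station",
--         "i need some water",
--     ]
--     hindi_templates = [
--         "मैं स्कूल जा रहा हूँ",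
--         "वह एक किताब पढ़ रहा है",
--         "उसे संगीत पसंद है",
--         "हम मशीन लर्निंग सीख रहे हैं",
--         "यह एक सुंदर दिन है",
--         "वे क्रिकेट खेल रहे हैं",
--         "कृपया दरवाज़ा खोलिए",
--         "खाना बहुत स्वादिष्ट है",
--         "निकटतम स्टेशन कहाँ है",
--         "मुझे थोड़ा पानी चाहिए",
--     ]
--     pairs = []
--     for i in range(n):
--         idx = i % len(english_templates)
--         pairs.append((english_templates[idx], hindi_templates[idx]))
--     return pairs
-- ===== SOURCE B (Python) =====
-- def get_fallback_eng_hindi_pairs(n: int = 200):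
--     english_templates = [
--         "i am going to school",
--         "he is reading a book",
--         "she likes music",
--         "we are learning machine learning",
--         "this is a beautiful day",
--         "they are playing cricket",
--         "please open the door",
--         "the food is very tasty",
--         "where is the nearest station",
--         "i need some water",
--     ]
--     hindi_templates = [
--         "मैं स्कूल जा रहा हूँ",
--         "वह एक किताब पढ़ रहा है",
--         "उसे संगीत पसंद है",
--         "हम मशीन लर्निंग सीख रहे हैं",
--         "यह एक सुंदर दिन है",
--         "वे क्रिकेट खेल रहे हैं",
--         "कृपया दरवाज़ा खोलिए",
--         "खाना बहुत स्वादिष्ट है",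
--         "निकटतम स्टेशन कहाँ है",
--         "मुझे थोड़ा पानी चाहिए",
--     ]
--     base = list(zip(english_templates, hindi_templates))
--     reps = n // len(base) + 1
--     return (base * reps)[:n]
-- ===== Notes on version B (the rewrite author's own statement) =====
-- stated objective: simpler
-- what changed: B zips the two template lists into the base pair list once, builds enough full cycles by list replication and trims with a single final slice, instead of A's per-index loop with modulo indexing into the two lists.
import Mathlib
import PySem

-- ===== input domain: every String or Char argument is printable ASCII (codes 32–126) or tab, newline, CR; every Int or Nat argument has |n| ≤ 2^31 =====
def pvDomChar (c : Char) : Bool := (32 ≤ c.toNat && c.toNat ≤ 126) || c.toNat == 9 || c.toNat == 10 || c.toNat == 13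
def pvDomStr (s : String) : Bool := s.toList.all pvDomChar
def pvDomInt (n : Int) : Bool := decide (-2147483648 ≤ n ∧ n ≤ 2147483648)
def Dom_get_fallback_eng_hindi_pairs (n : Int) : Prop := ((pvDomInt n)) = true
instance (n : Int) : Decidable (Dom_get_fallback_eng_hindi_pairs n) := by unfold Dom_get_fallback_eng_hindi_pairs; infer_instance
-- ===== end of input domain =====

-- ===== PORT A =====
-- B replicates the zipped 10-pair block and trims with one slice instead of A's per-index modulo loop (objective: simpler).
-- Shared constants: the two template lists (module-level data in both Pythons).
def pvEng : List String := [
  "i am going to school",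
  "he is reading a book",
  "she likes music",
  "we are learning machine learning",
  "this is a beautiful day",
  "they are playing cricket",
  "please open the door",
  "the food is very tasty",
  "where is the nearest station",
  "i need some water"]
def pvHin : List String := [
  "मैं स्कूल जा रहा हूँ",
  "वह एक किताब पढ़ रहा है",
  "उसे संगीत पसंद है",
  "हम मशीन लर्निंग सीख रहे हैं",
  "यह एक सुंदर दिन है",
  "वे क्रिकेट खेल रहे हैं",
  "कृपया दरवाज़ा खोलिए",
  "खाना बहुत स्वादिष्ट है",
  "निकटतम स्टेशन कहाँ है",
  "मुझे थोड़ा पानी चाहिए"]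

-- A: for i in range(n): idx = i % 10; pairs.append((eng[idx], hin[idx])).
-- idx is always in [0, 10), so pyGet? is always `some`; the .getD "" default is never used (exact).
def get_fallback_eng_hindi_pairs (n : Int) : List (String × String) :=
  (PySem.List.pyRange 0 n 1).foldl
    (fun pairs i =>
      let idx := PySem.Int.mod i (pvEng.length : Int)
      pairs ++ [((PySem.List.pyGet? pvEng idx).getD "", (PySem.List.pyGet? pvHin idx).getD "")])
    []

-- ===== PORT B =====
-- B: base = zip(eng, hin); (base * (n // len(base) + 1))[:n].
-- Python list repetition base * r (empty for r ≤ 0, hence .toNat is exact) is (List.replicate r.toNat base).flatten.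
def get_fallback_eng_hindi_pairs_alt (n : Int) : List (String × String) :=
  let base := pvEng.zip pvHin
  let reps := PySem.Int.floordiv n (base.length : Int) + 1
  PySem.List.slice ((List.replicate reps.toNat base).flatten) none (some n)

-- ===== PRECONDITION & SPEC =====
def Spec_get_fallback_eng_hindi_pairs (n : Int) (out : List (String × String)) : Prop := out = get_fallback_eng_hindi_pairs_alt n
instance (n : Int) (out : List (String × String)) : Decidable (Spec_get_fallback_eng_hindi_pairs n out) := by unfold Spec_get_fallback_eng_hindi_pairs; infer_instance

-- ===== CLAIM (what is proved, stated in full; the proofs are below) =====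
def Claim_equal_get_fallback_eng_hindi_pairs : Prop := ∀ (n : Int), Dom_get_fallback_eng_hindi_pairs n → Spec_get_fallback_eng_hindi_pairs n (get_fallback_eng_hindi_pairs n)

-- ===== LEMMAS AND PROOFS =====

-- the base pair at position m < 10, as port A computes it
theorem pv_fval : ∀ m : Nat, m < 10 →
    ((PySem.List.pyGet? pvEng (m : Int)).getD "", (PySem.List.pyGet? pvHin (m : Int)).getD "")
      = (pvEng.zip pvHin).getD m ("", "") := by decide

-- indexing into the replicated block is modulo indexing into the block
theorem pv_flat_get (r j : Nat) (hj : j < 10 * r) :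
    ((List.replicate r (pvEng.zip pvHin)).flatten)[j]?
      = some ((pvEng.zip pvHin).getD (j % 10) ("", "")) := by
  have hlen : (pvEng.zip pvHin).length = 10 := by rfl
  induction r generalizing j with
  | zero => omega
  | succ r ih =>
    rw [List.replicate_succ, List.flatten_cons]
    by_cases hl : j < 10
    · rw [List.getElem?_append_left (by omega), Nat.mod_eq_of_lt hl,
        List.getElem?_eq_getElem (by omega), List.getD_eq_getElem _ _ (by omega)]
    · obtain ⟨t, rfl⟩ : ∃ t, j = 10 + t := ⟨j - 10, by omega⟩
      rw [List.getElem?_append_right (by omega), hlen, Nat.add_sub_cancel_left,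
        ih t (by omega), Nat.add_mod_left]

-- A's loop, characterised
theorem pv_A_eq_map (n : Int) :
    get_fallback_eng_hindi_pairs n
      = (List.range n.toNat).map (fun j => (pvEng.zip pvHin).getD (j % 10) ("", "")) := by
  unfold get_fallback_eng_hindi_pairs
  rw [PySem.List.foldl_append_singleton_eq_map, PySem.List.pyRange_one, List.map_map]
  simp only [Int.sub_zero, zero_add]
  apply List.map_congr_left
  intro k hk
  simp only [Function.comp]
  have h10 : (pvEng.length : Int) = ((10 : Nat) : Int) := by rfl
  rw [h10, PySem.Int.mod_natCast, pv_fval (k % 10) (Nat.mod_lt _ (by omega))]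

-- B's replicate-and-slice, characterised (for nonnegative n)
theorem pv_B_eq_take (n : Int) (hn : 0 ≤ n) :
    get_fallback_eng_hindi_pairs_alt n
      = (((List.replicate ((n.toNat / 10) + 1) (pvEng.zip pvHin)).flatten).take n.toNat) := by
  unfold get_fallback_eng_hindi_pairs_alt
  simp only []
  have hlen : ((pvEng.zip pvHin).length : Int) = ((10 : Nat) : Int) := by rfl
  obtain ⟨k, rfl⟩ : ∃ k : Nat, n = (k : Int) := ⟨n.toNat, (Int.toNat_of_nonneg hn).symm⟩
  rw [hlen, PySem.Int.floordiv_natCast, PySem.List.slice_to_natCast]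
  norm_num
  congr 1

-- ===== VERDICT (by name: the statement is the Claim_ definition above) =====
theorem get_fallback_eng_hindi_pairs_spec : Claim_equal_get_fallback_eng_hindi_pairs := by
  intro n _
  show get_fallback_eng_hindi_pairs n = get_fallback_eng_hindi_pairs_alt n
  by_cases hn : 0 ≤ n
  · rw [pv_A_eq_map, pv_B_eq_take n hn]
    apply List.ext_getElem?
    intro i
    rw [List.getElem?_take, List.getElem?_map]
    by_cases hi : i < n.toNat
    · rw [if_pos hi, pv_flat_get _ i (by omega), List.getElem?_range hi]
      rfl
    · rw [if_neg hi]
      simp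
      omega
  · have hA : get_fallback_eng_hindi_pairs n = [] := by
      rw [pv_A_eq_map]
      simp [Int.toNat_of_nonpos (by omega : n ≤ 0)]
    have hr : (PySem.Int.floordiv n ((pvEng.zip pvHin).length : Int) + 1).toNat = 0 := by
      have hlen : ((pvEng.zip pvHin).length : Int) = 10 := by rfl
      rw [hlen]
      have := (PySem.Int.floordiv_lt_iff_lt_mul (a := n) (b := 10) (q := 0) (by omega)).2
      omega
    have hB : get_fallback_eng_hindi_pairs_alt n = [] := by
      unfold get_fallback_eng_hindi_pairs_alt
      simp only []
      rw [hr]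
      simp [PySem.List.slice]
    rw [hA, hB]
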